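-- pv_equiv track=rewrite | github.com/Yusee-Programmer/tauraro | benchmarks/05_hash_operations.py | hash_lookup_test
-- ===== SOURCE A (Python) =====
-- def hash_lookup_test(d, iterations):
--     """Test dictionary lookups"""
--     size = len(d)
--     total = 0
--     for i in range(iterations):
--         key = f"key_{i % size}"
--         if key in d:
--             total += d[key]
--     return total
-- ===== SOURCE B (Python) =====
-- def hash_lookup_test(d, iterations):
--     """Test dictionary lookups (closed form: one period summed once)"""
--     if iterations <= 0:
--         return 0
--     size = len(d)
--     per = [d.get(f"key_{j}", 0) for j in range(size)]
--     full, rem = divmod(iterations, size)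
--     return full * sum(per) + sum(per[:rem])
-- ===== Notes on version B (the rewrite author's own statement) =====
-- stated objective: faster
-- what changed: Instead of looping over all `iterations` cyclic key lookups, B sums the values of one period key_0..key_{size-1} once and returns full_cycles * period_sum + partial remainder sum.
import Mathlib
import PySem

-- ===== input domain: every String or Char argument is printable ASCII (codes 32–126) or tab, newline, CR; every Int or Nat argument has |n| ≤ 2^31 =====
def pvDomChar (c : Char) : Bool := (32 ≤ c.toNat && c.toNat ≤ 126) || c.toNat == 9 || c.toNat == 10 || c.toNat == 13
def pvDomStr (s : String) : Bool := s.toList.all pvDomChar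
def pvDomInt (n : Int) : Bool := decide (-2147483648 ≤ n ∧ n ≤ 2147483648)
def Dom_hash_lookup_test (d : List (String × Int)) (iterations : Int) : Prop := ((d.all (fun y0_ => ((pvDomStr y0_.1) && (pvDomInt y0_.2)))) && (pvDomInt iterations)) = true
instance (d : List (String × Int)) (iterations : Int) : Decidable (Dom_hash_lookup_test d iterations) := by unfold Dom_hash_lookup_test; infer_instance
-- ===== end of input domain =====

-- B replaces the O(iterations) lookup loop by a closed form: the values of one key period
-- key_0..key_{size-1} are summed once, then total = full_cycles * period_sum + remainder_sum.

-- ===== PORT A =====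
-- 'd' is a Python dict: the association list is normalised to PySem.Dict (insertion order,
-- later duplicate keys overwrite in place), exactly as dict construction does.
def hash_lookup_test (d : List (String × Int)) (iterations : Int) : Int :=
  let dd := PySem.Dict.ofList d
  let size : Int := dd.size
  (PySem.List.pyRange 0 iterations 1).foldl
    (fun total i =>
      let key := "key_" ++ PySem.Int.toStr (PySem.Int.mod i size)
      if dd.contains key then total + dd.getD key 0 else total) 0

-- ===== PORT B =====
def hash_lookup_test_alt (d : List (String × Int)) (iterations : Int) : Int :=
  if iterations ≤ 0 then 0
  else
    let dd := PySem.Dict.ofList d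
    let size : Int := dd.size
    let per := (PySem.List.pyRange 0 size 1).map
      (fun j => dd.getD ("key_" ++ PySem.Int.toStr j) 0)
    let full := PySem.Int.floordiv iterations size
    let rem := PySem.Int.mod iterations size
    full * per.sum + (PySem.List.slice per none (some rem)).sum

-- ===== PRECONDITION & SPEC =====
-- Pre_ excludes only the inputs where Python raises ZeroDivisionError (empty dict with a
-- positive iteration count: 'i % size' with size = 0); B raises there too (divmod by 0).
def Pre_hash_lookup_test (d : List (String × Int)) (iterations : Int) : Prop :=
  iterations ≤ 0 ∨ d ≠ []
instance (d : List (String × Int)) (iterations : Int) : Decidable (Pre_hash_lookup_test d iterations) := by unfold Pre_hash_lookup_test; infer_instance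

def pvWitness_hash_lookup_test : (List (String × Int)) × Int := ([("key_0", 3), ("key_1", -2)], 5)

def Spec_hash_lookup_test (d : List (String × Int)) (iterations : Int) (out : Int) : Prop := out = hash_lookup_test_alt d iterations
instance (d : List (String × Int)) (iterations : Int) (out : Int) : Decidable (Spec_hash_lookup_test d iterations out) := by unfold Spec_hash_lookup_test; infer_instance

-- ===== CLAIM (what is proved, stated in full; the proofs are below) =====
def Claim_equal_hash_lookup_test : Prop := ∀ (d : List (String × Int)) (iterations : Int), Dom_hash_lookup_test d iterations → Pre_hash_lookup_test d iterations → Spec_hash_lookup_test d iterations (hash_lookup_test d iterations)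

-- ===== LEMMAS AND PROOFS =====

-- one step of A's body is 'add the defaulted lookup' (the guard only skips adding 0)
theorem pv_step (dd : PySem.Dict String Int) (k : String) (t : Int) :
    (if dd.contains k then t + dd.getD k 0 else t) = t + dd.getD k 0 := by
  by_cases h : dd.contains k = true
  · simp [h]
  · simp only [Bool.not_eq_true] at h
    simp [h, PySem.Dict.getD_of_not_contains dd 0 h]

-- a nonempty association list yields a nonempty dict
theorem pv_size_pos (p : String × Int) (rest : List (String × Int)) :
    0 < (PySem.Dict.ofList (p :: rest)).size := by
  have hk : p.1 ∈ (PySem.Dict.ofList (p :: rest)).keys := by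
    show p.1 ∈ (PySem.Dict.empty.update (p :: rest)).keys
    unfold PySem.Dict.update
    rw [PySem.Dict.keys_foldl_insert_key (p :: rest) Prod.fst (fun _ q => q.2) PySem.Dict.empty]
    simp
  have : (PySem.Dict.ofList (p :: rest)).keys.length ≠ 0 :=
    fun h => by simp [List.length_eq_zero_iff.mp h] at hk
  have hkeys : (PySem.Dict.ofList (p :: rest)).keys.length
      = (PySem.Dict.ofList (p :: rest)).size := by
    simp [PySem.Dict.keys, PySem.Dict.size]
  omega

-- closed form for a sum of a periodic function over an initial segment
theorem pv_periodic_sum (h : Nat → Int) (s : Nat) (hs : 0 < s) : ∀ n : Nat,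
    ((List.range n).map (fun k => h (k % s))).sum
      = (n / s : Nat) * ((List.range s).map h).sum + ((List.range (n % s)).map h).sum := by
  intro n
  induction n with
  | zero => simp [Nat.zero_div, Nat.zero_mod]
  | succ n ih =>
    obtain ⟨q, r, hr, hqr, hdiv, hmod⟩ :
        ∃ q r, r < s ∧ n = s * q + r ∧ n / s = q ∧ n % s = r :=
      ⟨n / s, n % s, Nat.mod_lt _ hs, (Nat.div_add_mod n s).symm, rfl, rfl⟩
    rw [List.range_succ, List.map_append, List.sum_append, ih, hdiv, hmod]
    simp only [List.map_cons, List.map_nil, List.sum_cons, List.sum_nil]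
    by_cases hcase : r + 1 = s
    · have hd1 : (n + 1) / s = q + 1 := by
        rw [show n + 1 = s * (q + 1) by rw [Nat.mul_add, Nat.mul_one]; omega, Nat.mul_div_cancel_left _ hs]
      have hm1 : (n + 1) % s = 0 := by
        rw [show n + 1 = s * (q + 1) by rw [Nat.mul_add, Nat.mul_one]; omega, Nat.mul_mod_right]
      have hper : ((List.range s).map h).sum = ((List.range r).map h).sum + h r := by
        rw [show s = r + 1 from hcase.symm, List.range_succ, List.map_append, List.sum_append]
        simp
      rw [hd1, hm1, hper, hmod]
      simp only [List.range_zero, List.map_nil, List.sum_nil]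
      push_cast
      ring
    · have hd1 : (n + 1) / s = q := by
        rw [show n + 1 = s * q + (r + 1) by omega, Nat.mul_add_div hs,
          Nat.div_eq_of_lt (by omega), Nat.add_zero]
      have hm1 : (n + 1) % s = r + 1 := by
        rw [show n + 1 = s * q + (r + 1) by omega, Nat.mul_add_mod,
          Nat.mod_eq_of_lt (by omega)]
      rw [hd1, hm1, List.range_succ, List.map_append, List.sum_append, hmod]
      simp [add_assoc]

-- ===== VERDICT (by name: the statement is the Claim_ definition above) =====
theorem hash_lookup_test_spec : Claim_equal_hash_lookup_test := by
  intro d iterations _ hpre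
  unfold Spec_hash_lookup_test hash_lookup_test hash_lookup_test_alt
  by_cases hit : iterations ≤ 0
  · simp [hit, PySem.List.pyRange_one_eq_nil (b := iterations) (by omega)]
  · simp only [if_neg hit]
    obtain h0 | hne := hpre
    · omega
    obtain ⟨p, rest, rfl⟩ : ∃ p rest, d = p :: rest := by
      cases d with
      | nil => exact absurd rfl hne
      | cons p rest => exact ⟨p, rest, rfl⟩
    set dd := PySem.Dict.ofList (p :: rest) with hdd
    have hs : 0 < dd.size := pv_size_pos p rest
    set s : Nat := dd.size with hsz
    obtain ⟨n, rfl⟩ : ∃ n : Nat, iterations = (n : Int) :=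
      ⟨iterations.toNat, (Int.toNat_of_nonneg (by omega)).symm⟩
    -- A side: fold to a sum of the periodic function
    have hA : (PySem.List.pyRange 0 (n : Int) 1).foldl
        (fun total i =>
          let key := "key_" ++ PySem.Int.toStr (PySem.Int.mod i (s : Int))
          if dd.contains key then total + dd.getD key 0 else total) 0
        = ((List.range n).map (fun k =>
            dd.getD ("key_" ++ PySem.Int.toStr ((k % s : Nat) : Int)) 0)).sum := by
      simp only [pv_step]
      rw [show (PySem.List.pyRange 0 (n : Int) 1).foldl
            (fun total i => total + dd.getD ("key_" ++ PySem.Int.toStr (PySem.Int.mod i (s : Int))) 0) 0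
          = (((PySem.List.pyRange 0 (n : Int) 1)).map
              (fun i => dd.getD ("key_" ++ PySem.Int.toStr (PySem.Int.mod i (s : Int))) 0)).sum by
        rw [PySem.List.foldl_add]; simp]
      rw [PySem.List.pyRange_one, List.map_map]
      congr 1
      apply List.map_congr_left
      intro k _
      simp [PySem.Int.mod_natCast]
    rw [hA]
    -- B side: the per list is the periodic function's one period
    have hper : (PySem.List.pyRange 0 (s : Int) 1).map
        (fun j => dd.getD ("key_" ++ PySem.Int.toStr j) 0)
        = (List.range s).map (fun k => dd.getD ("key_" ++ PySem.Int.toStr ((k : Nat) : Int)) 0) := by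
      rw [PySem.List.pyRange_one, List.map_map]
      apply List.map_congr_left
      intro k _
      simp
    rw [hper, PySem.Int.floordiv_natCast, PySem.Int.mod_natCast, PySem.List.slice_to_natCast]
    rw [Eq.symm (List.map_take ..), List.take_range, Nat.min_eq_left (le_of_lt (Nat.mod_lt _ hs))]
    exact pv_periodic_sum (fun k => dd.getD ("key_" ++ PySem.Int.toStr ((k : Nat) : Int)) 0) s hs n
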